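-- pv_equiv track=rewrite | github.com/Fisch37/translate-tools | ext_api/translate.py | _join_up_to_length
-- ===== SOURCE A (Python) =====
-- def _join_up_to_length(
--         segments: list[str],
--         join_char: str,
--         length: int,
--         /
--     ) -> tuple[str, list[str]]:
--     """"""
--     result = ""
--     used_join_char = ""
--     while len(segments) > 0 \
--         and len(result) + len(used_join_char) + len(segments[0]) <= length:
--         result += used_join_char + segments.pop(0)
--         used_join_char = join_char
--     return result, segments
-- ===== SOURCE B (Python) =====
-- def _join_up_to_length(segments, join_char, length, /):
--     # One pass over the list: a running cumulative length finds the cutoff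
--     # index, then a single join and a single prefix deletion.
--     jlen = len(join_char)
--     total = 0
--     k = 0
--     for seg in segments:
--         cost = total + (jlen if k else 0) + len(seg)
--         if cost > length:
--             break
--         total = cost
--         k += 1
--     joined = join_char.join(segments[:k])
--     del segments[:k]
--     return joined, segments
-- ===== Notes on version B (the rewrite author's own statement) =====
-- stated objective: alternative
-- what changed: Instead of repeatedly popping the first element and re-concatenating the growing string, B scans once with a running cumulative length to find the cutoff index, then does one join and one prefix deletion.
import Mathlib
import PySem

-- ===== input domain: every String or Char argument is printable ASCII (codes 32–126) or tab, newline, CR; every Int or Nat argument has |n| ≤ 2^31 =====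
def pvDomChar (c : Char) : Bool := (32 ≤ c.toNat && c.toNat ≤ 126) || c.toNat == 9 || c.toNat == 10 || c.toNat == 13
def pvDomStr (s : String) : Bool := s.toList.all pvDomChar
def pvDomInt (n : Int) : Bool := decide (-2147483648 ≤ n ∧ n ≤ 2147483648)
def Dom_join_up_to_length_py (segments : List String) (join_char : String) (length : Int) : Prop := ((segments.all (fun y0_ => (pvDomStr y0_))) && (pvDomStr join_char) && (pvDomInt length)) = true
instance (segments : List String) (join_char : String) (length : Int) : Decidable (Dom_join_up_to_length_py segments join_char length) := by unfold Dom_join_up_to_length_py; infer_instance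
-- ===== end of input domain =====

-- B replaces A's pop-and-reconcatenate loop by a single cumulative-length scan that finds the
-- cutoff index, followed by one join and one split (objective: alternative).
-- A mutates `segments` in place (pop(0)); B performs the same prefix deletion in Python, and the
-- Lean equivalence is about the return value.

-- ===== PORT A =====
-- the while loop: state (remaining segments, result, used_join_char)
def pvALoop (join_char : String) (length : Int) : List String → String → String → String × List String
  | [], result, _ => (result, [])
  | s :: rest, result, used_join_char =>
      if PySem.Str.len result + PySem.Str.len used_join_char + PySem.Str.len s ≤ length then
        pvALoop join_char length rest (result ++ (used_join_char ++ s)) join_char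
      else
        (result, s :: rest)

def join_up_to_length_py (segments : List String) (join_char : String) (length : Int) : String × List String :=
  pvALoop join_char length segments "" ""

-- ===== PORT B =====
-- Source B's for loop: state (remaining segments, total, k); returns the cutoff index k
def pvCut (jlen length : Int) : List String → Int → Nat → Nat
  | [], _, k => k
  | seg :: rest, total, k =>
      let cost := total + (if k ≠ 0 then jlen else 0) + PySem.Str.len seg
      if cost > length then k
      else pvCut jlen length rest cost (k + 1)

def join_up_to_length_py_alt (segments : List String) (join_char : String) (length : Int) : String × List String :=
  let jlen := PySem.Str.len join_char
  let k := pvCut jlen length segments 0 0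
  (PySem.Str.join join_char (segments.take k), segments.drop k)

-- ===== PRECONDITION & SPEC =====
def Spec_join_up_to_length_py (segments : List String) (join_char : String) (length : Int) (out : String × List String) : Prop := out = join_up_to_length_py_alt segments join_char length
instance (segments : List String) (join_char : String) (length : Int) (out : String × List String) : Decidable (Spec_join_up_to_length_py segments join_char length out) := by unfold Spec_join_up_to_length_py; infer_instance

-- ===== CLAIM (what is proved, stated in full; the proofs are below) =====
def Claim_equal_join_up_to_length_py : Prop := ∀ (segments : List String) (join_char : String) (length : Int), Dom_join_up_to_length_py segments join_char length → Spec_join_up_to_length_py segments join_char length (join_up_to_length_py segments join_char length)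

-- ===== LEMMAS AND PROOFS =====

-- number of segments taken by the steady-state loop (used_join_char already = join_char)
def pvCnt (jlen length : Int) : List String → Int → Nat
  | [], _ => 0
  | seg :: rest, total =>
      if total + jlen + PySem.Str.len seg > length then 0
      else pvCnt jlen length rest (total + jlen + PySem.Str.len seg) + 1

theorem pvCut_shift (jlen length : Int) :
    ∀ (segs : List String) (total : Int) (k : Nat),
      pvCut jlen length segs total (k + 1) = (k + 1) + pvCnt jlen length segs total := by
  intro segs
  induction segs with
  | nil => intro total k; simp [pvCut, pvCnt]
  | cons s rest ih =>
      intro total k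
      simp only [pvCut, pvCnt, ne_eq, Nat.succ_ne_zero, not_false_eq_true, if_true]
      by_cases h : total + jlen + PySem.Str.len s > length
      · rw [if_pos h, if_pos h]
      · rw [if_neg h, if_neg h, ih]; omega

theorem pvALoop_steady (jc : String) (length : Int) :
    ∀ (segs : List String) (res : String),
      pvALoop jc length segs res jc =
        (String.ofList (res.toList ++
            (segs.take (pvCnt (PySem.Str.len jc) length segs (PySem.Str.len res))).flatMap
              (fun s => jc.toList ++ s.toList)),
         segs.drop (pvCnt (PySem.Str.len jc) length segs (PySem.Str.len res))) := by
  intro segs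
  induction segs with
  | nil => intro res; simp [pvALoop, pvCnt]
  | cons s rest ih =>
      intro res
      simp only [pvALoop, pvCnt]
      by_cases h : PySem.Str.len res + PySem.Str.len jc + PySem.Str.len s ≤ length
      · rw [if_pos h, if_neg (not_lt.mpr h), ih]
        have hlen : PySem.Str.len (res ++ (jc ++ s)) =
            PySem.Str.len res + PySem.Str.len jc + PySem.Str.len s := by
          simp [PySem.Str.len_eq]; ring
        rw [hlen]
        simp [List.take_succ_cons, List.drop_succ_cons, List.flatMap_cons, List.append_assoc]
      · rw [if_neg h, if_pos (not_le.mp h)]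
        simp

-- toList of a Python join of a nonempty list
theorem toList_join_cons (jc : String) :
    ∀ (xs : List String) (s : String),
      (PySem.Str.join jc (s :: xs)).toList =
        s.toList ++ xs.flatMap (fun t => jc.toList ++ t.toList) := by
  intro xs
  induction xs with
  | nil => intro s; simp [PySem.Str.toList_join, PySem.Chars.join_singleton]
  | cons t rest ih =>
      intro s
      have h1 : (PySem.Str.join jc (s :: t :: rest)).toList =
          s.toList ++ jc.toList ++ (PySem.Str.join jc (t :: rest)).toList := by
        simp [PySem.Str.toList_join, PySem.Chars.join_cons_cons]
      rw [h1, ih]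
      simp [List.flatMap_cons, List.append_assoc]

theorem string_eq_of_toList {s t : String} (h : s.toList = t.toList) : s = t := by
  have := congrArg String.ofList h
  simpa using this

theorem join_nil_str (jc : String) : PySem.Str.join jc [] = "" :=
  string_eq_of_toList (by simp [PySem.Str.toList_join, PySem.Chars.join_nil])

theorem len_empty_str : PySem.Str.len "" = (0 : Int) := by decide

-- ===== VERDICT (by name: the statement is the Claim_ definition above) =====
theorem join_up_to_length_py_spec : Claim_equal_join_up_to_length_py := by
  intro segments jc length _
  unfold Spec_join_up_to_length_py join_up_to_length_py join_up_to_length_py_alt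
  cases segments with
  | nil => simp [pvALoop, pvCut, join_nil_str]
  | cons s rest =>
      simp only [pvALoop, pvCut, ne_eq, not_true_eq_false, if_false, reduceIte]
      rw [len_empty_str]
      by_cases h : PySem.Str.len s ≤ length
      · have h' : (0 : Int) + 0 + PySem.Str.len s ≤ length := by omega
        have hgt : ¬ ((0 : Int) + 0 + PySem.Str.len s > length) := by omega
        rw [if_pos h', if_neg hgt]
        have hempty : ("" ++ ("" ++ s)) = s := by simp
        rw [hempty, pvALoop_steady, pvCut_shift]
        have harg : (0 : Int) + 0 + PySem.Str.len s = PySem.Str.len s := by omega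
        rw [harg]
        have hcomm : 0 + 1 + pvCnt (PySem.Str.len jc) length rest (PySem.Str.len s) =
            pvCnt (PySem.Str.len jc) length rest (PySem.Str.len s) + 1 := by omega
        rw [hcomm]
        refine Prod.ext ?_ ?_
        · apply string_eq_of_toList
          rw [List.take_succ_cons, toList_join_cons]
          simp
        · simp [List.drop_succ_cons]
      · have h' : ¬ ((0 : Int) + 0 + PySem.Str.len s ≤ length) := by omega
        have hgt : (0 : Int) + 0 + PySem.Str.len s > length := by omega
        rw [if_neg h', if_pos hgt]
        simp [join_nil_str]
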